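-- pv_equiv track=rewrite | github.com/nkyono/PE | misc_funcs/polygonalForms.py | pentNums
-- ===== SOURCE A (Python) =====
-- def pentNums(minLim, maxLim):
--     nums = []
--     x = 1
--     while(True):
--         num = int(x*(3*x-1)/2)
--         if num < maxLim:
--             if num > minLim:
--                 nums.append(num)
--         else:
--             break
--         x = x + 1
--     return nums
-- ===== SOURCE B (Python) =====
-- def _isqrt(n):
--     # hand-written Newton integer square root (no imports in the original module)
--     if n == 0:
--         return 0
--     x = n
--     y = (x + 1) // 2
--     while y < x:
--         x = y
--         y = (x + n // x) // 2
--     return x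
--
--
-- def pentNums(minLim, maxLim):
--     # invert P(x) = x*(3x-1)/2 to get the qualifying index range directly
--     if maxLim < 2:
--         return []
--     xmax = (1 + _isqrt(24 * maxLim - 23)) // 6
--     if minLim < 1:
--         xmin = 1
--     else:
--         xmin = (1 + _isqrt(24 * minLim + 1)) // 6 + 1
--     return [x * (3 * x - 1) // 2 for x in range(xmin, xmax + 1)]
-- ===== Notes on version B (the rewrite author's own statement) =====
-- stated objective: alternative
-- what changed: B inverts the pentagonal formula with a hand-written Newton integer square root to compute the qualifying index range [xmin, xmax] directly and maps the formula over that range, instead of A's scan from x=1 with nested branches and a break.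
import Mathlib
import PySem

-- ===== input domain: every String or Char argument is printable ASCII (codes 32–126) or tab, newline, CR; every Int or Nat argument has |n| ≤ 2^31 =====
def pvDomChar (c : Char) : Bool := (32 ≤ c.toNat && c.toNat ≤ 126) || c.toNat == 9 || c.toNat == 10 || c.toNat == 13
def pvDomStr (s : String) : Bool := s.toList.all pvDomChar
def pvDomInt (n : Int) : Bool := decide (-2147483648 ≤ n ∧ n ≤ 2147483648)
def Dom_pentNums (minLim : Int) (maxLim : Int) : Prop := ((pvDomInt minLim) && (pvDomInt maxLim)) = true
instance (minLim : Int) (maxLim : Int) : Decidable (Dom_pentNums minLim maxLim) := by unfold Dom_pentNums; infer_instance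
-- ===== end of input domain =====

-- B computes the qualifying index range by inverting the pentagonal formula (Newton isqrt)
-- instead of A's scan from x = 1; equal return values are proved on all inputs.

-- ===== PORT A =====
-- termination helper for A's while-True loop (cited by decreasing_by): while the loop
-- continues, num < maxLim and x ≤ num, so maxLim - x shrinks as x grows.
theorem pentNums_loop_lt (maxLim x : Int) (hx : 1 ≤ x)
    (h : PySem.Int.floordiv (x * (3 * x - 1)) 2 < maxLim) : x < maxLim := by
  have hle : x ≤ PySem.Int.floordiv (x * (3 * x - 1)) 2 := by
    rw [PySem.Int.le_floordiv_iff_mul_le (show (0:Int) < 2 by norm_num)]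
    nlinarith
  omega

-- int(x*(3*x-1)/2): the product is even and nonnegative for x ≥ 1, so Python's
-- float division + int() equals floor division exactly on the admitted domain.
def pentNumsLoop (minLim maxLim x : Int) (hx : 1 ≤ x) (nums : List Int) : List Int :=
  let num := PySem.Int.floordiv (x * (3 * x - 1)) 2
  if h : num < maxLim then
    pentNumsLoop minLim maxLim (x + 1) (by omega)
      (if num > minLim then nums ++ [num] else nums)
  else nums
termination_by (maxLim - x).toNat
decreasing_by
  have := pentNums_loop_lt maxLim x hx h
  omega

def pentNums (minLim : Int) (maxLim : Int) : List Int :=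
  pentNumsLoop minLim maxLim 1 (by norm_num) []

-- ===== PORT B =====
-- Newton loop of Source B's _isqrt; arguments are Nat because every value _isqrt touches
-- in B is a nonnegative integer, so Nat division mirrors Python's // exactly here.
def pvNewton (n x y : Nat) : Nat :=
  if y < x then pvNewton n y ((y + n / y) / 2) else x
termination_by x

def pvIsqrt (n : Nat) : Nat :=
  if n = 0 then 0 else pvNewton n n ((n + 1) / 2)

def pentNums_alt (minLim : Int) (maxLim : Int) : List Int :=
  if maxLim < 2 then []
  else
    let xmax := PySem.Int.floordiv (1 + (pvIsqrt (24 * maxLim - 23).toNat : Int)) 6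
    let xmin := if minLim < 1 then 1
      else PySem.Int.floordiv (1 + (pvIsqrt (24 * minLim + 1).toNat : Int)) 6 + 1
    (PySem.List.pyRange xmin (xmax + 1) 1).map
      (fun x => PySem.Int.floordiv (x * (3 * x - 1)) 2)

-- ===== PRECONDITION & SPEC =====
def Spec_pentNums (minLim : Int) (maxLim : Int) (out : List Int) : Prop := out = pentNums_alt minLim maxLim
instance (minLim : Int) (maxLim : Int) (out : List Int) : Decidable (Spec_pentNums minLim maxLim out) := by unfold Spec_pentNums; infer_instance

-- ===== CLAIM (what is proved, stated in full; the proofs are below) =====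
def Claim_equal_pentNums : Prop := ∀ (minLim : Int) (maxLim : Int), Dom_pentNums minLim maxLim → Spec_pentNums minLim maxLim (pentNums minLim maxLim)

-- ===== LEMMAS AND PROOFS =====

-- x*(3x-1) is always even
theorem qEven (x : Int) : 2 ∣ x * (3 * x - 1) := by
  rcases Int.even_or_odd x with ⟨k, hk⟩ | ⟨k, hk⟩
  · exact ⟨k * (3 * x - 1), by rw [hk]; ring⟩
  · exact ⟨x * (3 * k + 1), by rw [hk]; ring⟩

theorem two_mul_P (x : Int) :
    2 * PySem.Int.floordiv (x * (3 * x - 1)) 2 = x * (3 * x - 1) := by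
  rw [PySem.Int.floordiv_eq_ediv_of_pos (show (0:Int) < 2 by norm_num)]
  exact Int.mul_ediv_cancel' (qEven x)

theorem qMono {a b : Int} (ha : 1 ≤ a) (hab : a ≤ b) :
    a * (3 * a - 1) ≤ b * (3 * b - 1) := by nlinarith

-- Newton AM-GM step: the next iterate never drops below ⌊√n⌋.
theorem newton_amgm (n x : Nat) (hx : 1 ≤ x) : Nat.sqrt n ≤ (x + n / x) / 2 := by
  set s := Nat.sqrt n with hs
  have hs2 : s * s ≤ n := by
    have := Nat.sqrt_le' n
    nlinarith [this]
  have h1 : s * s / x ≤ n / x := Nat.div_le_div_right hs2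
  have hdm := Nat.div_add_mod (s * s) x
  have hmlt : s * s % x < x := Nat.mod_lt _ (by omega)
  have hamgm : 2 * (s * x) ≤ s * s + x * x := by
    rcases le_total s x with h | h
    · nlinarith
    · nlinarith
  have key : 2 * s ≤ x + s * s / x := by nlinarith [hdm, hmlt, hamgm]
  have : 2 * s ≤ x + n / x := by omega
  omega

-- Newton loop computes ⌊√n⌋ from any start ≥ ⌊√n⌋.
theorem pvNewton_eq (n : Nat) (hn : 1 ≤ n) :
    ∀ x, 1 ≤ x → Nat.sqrt n ≤ x → pvNewton n x ((x + n / x) / 2) = Nat.sqrt n := by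
  intro x
  induction x using Nat.strong_induction_on with
  | _ x ih =>
    intro hx1 hsx
    rw [pvNewton]
    by_cases h : (x + n / x) / 2 < x
    · rw [if_pos h]
      have hs1 : 1 ≤ Nat.sqrt n := Nat.sqrt_pos.mpr (by omega)
      have hy1 : 1 ≤ (x + n / x) / 2 := le_trans hs1 (newton_amgm n x hx1)
      exact ih _ h hy1 (newton_amgm n x hx1)
    · rw [if_neg h]
      rw [not_lt] at h
      have h2 : x * 2 ≤ x + n / x := (Nat.le_div_iff_mul_le (by norm_num)).mp h
      have h3 : x ≤ n / x := by omega
      have h4 : x * x ≤ n := (Nat.le_div_iff_mul_le (by omega)).mp h3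
      exact le_antisymm (Nat.le_sqrt.mpr h4) hsx

theorem pvIsqrt_eq (n : Nat) : pvIsqrt n = Nat.sqrt n := by
  by_cases h : n = 0
  · simp [pvIsqrt, h]
  · have hn : 1 ≤ n := by omega
    unfold pvIsqrt
    rw [if_neg h]
    have e : (n + 1) / 2 = (n + n / n) / 2 := by rw [Nat.div_self hn]
    rw [e]
    exact pvNewton_eq n hn n hn (Nat.sqrt_le_self n)

-- bracket facts for X = (1 + ⌊√c⌋) // 6 when c ≥ 25
theorem bracket (c : Int) (hc : 25 ≤ c) :
    0 ≤ PySem.Int.floordiv (1 + ((Nat.sqrt c.toNat : Nat) : Int)) 6 ∧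
    12 * (PySem.Int.floordiv (1 + ((Nat.sqrt c.toNat : Nat) : Int)) 6 *
      (3 * PySem.Int.floordiv (1 + ((Nat.sqrt c.toNat : Nat) : Int)) 6 - 1)) ≤ c - 1 ∧
    c ≤ 12 * ((PySem.Int.floordiv (1 + ((Nat.sqrt c.toNat : Nat) : Int)) 6 + 1) *
      (3 * (PySem.Int.floordiv (1 + ((Nat.sqrt c.toNat : Nat) : Int)) 6 + 1) - 1)) := by
  set t : Int := ((Nat.sqrt c.toNat : Nat) : Int) with hts
  set X : Int := PySem.Int.floordiv (1 + t) 6 with hXs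
  have hc0 : (c.toNat : Int) = c := Int.toNat_of_nonneg (by omega)
  have ht0 : 0 ≤ t := by positivity
  have ht1 : t * t ≤ c := by
    have := Nat.sqrt_le' c.toNat
    have : ((Nat.sqrt c.toNat ^ 2 : Nat) : Int) ≤ ((c.toNat : Nat) : Int) := by exact_mod_cast this
    push_cast at this
    nlinarith [this]
  have ht2 : c < (t + 1) * (t + 1) := by
    have := Nat.lt_succ_sqrt' c.toNat
    have : ((c.toNat : Nat) : Int) < ((Nat.sqrt c.toNat).succ ^ 2 : Nat) := by exact_mod_cast this
    push_cast at this
    nlinarith [this]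
  have ht5 : 5 ≤ t := by nlinarith
  have hX := (PySem.Int.floordiv_eq_iff_of_pos (show (0:Int) < 6 by norm_num)).mp hXs.symm
  obtain ⟨hq1, hq2⟩ := hX
  have hX0 : 0 ≤ X := by omega
  refine ⟨hX0, ?_, ?_⟩
  · by_cases hX1 : X = 0
    · rw [hX1]; omega
    · have h1 : 1 ≤ X := by omega
      have h6 : (0:Int) ≤ 6 * X - 1 := by omega
      have hle : 6 * X - 1 ≤ t := by omega
      nlinarith [mul_self_le_mul_self h6 hle]
  · have hle : t + 1 ≤ 6 * X + 5 := by omega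
    have h0 : (0:Int) ≤ t + 1 := by omega
    nlinarith [mul_self_le_mul_self h0 hle]

-- A's loop equals mapping P over the integer range [max x xmin, xmax]
theorem loopA_eq (m M xmin xmax : Int)
    (hlt : ∀ x : Int, 1 ≤ x → (PySem.Int.floordiv (x * (3 * x - 1)) 2 < M ↔ x ≤ xmax))
    (hgt : ∀ x : Int, 1 ≤ x → (m < PySem.Int.floordiv (x * (3 * x - 1)) 2 ↔ xmin ≤ x)) :
    ∀ (k : Nat) (x : Int) (hx : 1 ≤ x), (M - x).toNat = k → ∀ (nums : List Int),
      pentNumsLoop m M x hx nums =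
        nums ++ (PySem.List.pyRange (max x xmin) (xmax + 1)).map
          (fun y => PySem.Int.floordiv (y * (3 * y - 1)) 2) := by
  intro k
  induction k using Nat.strong_induction_on with
  | _ k ih =>
    intro x hx hk nums
    rw [pentNumsLoop]
    by_cases h : PySem.Int.floordiv (x * (3 * x - 1)) 2 < M
    · rw [dif_pos h]
      have hxM := pentNums_loop_lt M x hx h
      have hxmax : x ≤ xmax := (hlt x hx).mp h
      have hk' : (M - (x + 1)).toNat < k := by omega
      rw [ih _ hk' (x + 1) (by omega) rfl]
      by_cases h2 : xmin ≤ x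
      · rw [if_pos ((hgt x hx).mpr h2)]
        have e1 : max x xmin = x := by omega
        have e2 : max (x + 1) xmin = x + 1 := by omega
        rw [e1, e2, PySem.List.pyRange_one_cons (show x < xmax + 1 by omega)]
        simp
      · rw [if_neg (by intro hc; exact h2 ((hgt x hx).mp hc))]
        have e1 : max x xmin = xmin := by omega
        have e2 : max (x + 1) xmin = xmin := by omega
        rw [e1, e2]
    · rw [dif_neg h]
      have hxmax : xmax < x := by
        by_contra hc
        exact h ((hlt x hx).mpr (by omega))
      rw [PySem.List.pyRange_one_eq_nil (show xmax + 1 ≤ max x xmin by omega)]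
      simp

-- ===== VERDICT (by name: the statement is the Claim_ definition above) =====
theorem pentNums_spec : Claim_equal_pentNums := by
  intro m M _
  unfold Spec_pentNums pentNums pentNums_alt
  by_cases hM : M < 2
  · rw [if_pos hM, pentNumsLoop]
    have e : PySem.Int.floordiv (1 * (3 * 1 - 1)) 2 = 1 := by
      norm_num [PySem.Int.floordiv_eq_ediv_of_pos (show (0:Int) < 2 by norm_num)]
    rw [dif_neg (by rw [e]; omega)]
  · rw [if_neg hM]
    have hM2 : 2 ≤ M := by omega
    dsimp only
    rw [pvIsqrt_eq]
    set X : Int := PySem.Int.floordiv (1 + ((Nat.sqrt (24 * M - 23).toNat : Nat) : Int)) 6 with hXs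
    obtain ⟨hX0, hXa, hXb⟩ := bracket (24 * M - 23) (by omega)
    rw [← hXs] at hXa hXb
    -- P x < M ↔ x ≤ X  for x ≥ 1
    have hlt : ∀ x : Int, 1 ≤ x → (PySem.Int.floordiv (x * (3 * x - 1)) 2 < M ↔ x ≤ X) := by
      intro x hx
      have hP := two_mul_P x
      have hQX : X * (3 * X - 1) ≤ 2 * M - 2 := by omega
      have hQX1 : 2 * M ≤ (X + 1) * (3 * (X + 1) - 1) := by
        obtain ⟨kk, hkk⟩ := qEven (X + 1)
        omega
      constructor
      · intro h
        by_contra hc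
        have h1 : X + 1 ≤ x := by omega
        have := qMono (show (1:Int) ≤ X + 1 by omega) h1
        omega
      · intro h
        have := qMono hx h
        omega
    -- m < P x ↔ xmin ≤ x  for x ≥ 1
    by_cases hm : m < 1
    · rw [if_pos hm]
      have hgt : ∀ x : Int, 1 ≤ x → (m < PySem.Int.floordiv (x * (3 * x - 1)) 2 ↔ (1:Int) ≤ x) := by
        intro x hx
        have hP := two_mul_P x
        have h1 : (1:Int) * (3 * 1 - 1) ≤ x * (3 * x - 1) := qMono le_rfl hx
        constructor
        · intro _; exact hx
        · intro _; omega
      rw [loopA_eq m M 1 X hlt hgt _ 1 (by norm_num) rfl []]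
      rw [List.nil_append, max_self, pvIsqrt_eq]
    · rw [if_neg hm]
      have hm1 : 1 ≤ m := by omega
      rw [pvIsqrt_eq]
      set U : Int := PySem.Int.floordiv (1 + ((Nat.sqrt (24 * m + 1).toNat : Nat) : Int)) 6 with hUs
      obtain ⟨hU0, hUa, hUb⟩ := bracket (24 * m + 1) (by omega)
      rw [← hUs] at hUa hUb
      have hgt : ∀ x : Int, 1 ≤ x → (m < PySem.Int.floordiv (x * (3 * x - 1)) 2 ↔ U + 1 ≤ x) := by
        intro x hx
        have hP := two_mul_P x
        have hQU : U * (3 * U - 1) ≤ 2 * m := by omega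
        have hQU1 : 2 * m < (U + 1) * (3 * (U + 1) - 1) := by omega
        constructor
        · intro h
          by_contra hc
          have hxU : x ≤ U := by omega
          have := qMono hx hxU
          omega
        · intro h
          have := qMono (show (1:Int) ≤ U + 1 by omega) h
          omega
      rw [loopA_eq m M (U + 1) X hlt hgt _ 1 (by norm_num) rfl []]
      have e : max 1 (U + 1) = U + 1 := by omega
      rw [e, List.nil_append]
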